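-- pv_equiv track=rewrite | github.com/hasanmdme/decap | src/python-utils/capabilityAnalysis.py | getSyscallNameFromSyscallNumber
-- ===== SOURCE A (Python) =====
-- def getSyscallNameFromSyscallNumber(syscallNumbers, syscallNumberToNameMap):
--     syscallNameList = []
--     i = 0
--     while i < 400:
--         if ( i in syscallNumbers and syscallNumberToNameMap.get(i, None)):
--                 syscallNameList.append(syscallNumberToNameMap[i])
--         i += 1
--     #print ('\nExtracted syscall Names intersected: ', syscallNameList, '\n')
--     return syscallNameList
-- ===== SOURCE B (Python) =====
-- def getSyscallNameFromSyscallNumber(syscallNumbers, syscallNumberToNameMap):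
--     present = set(syscallNumbers)
--     keys = sorted(k for k in syscallNumberToNameMap
--                   if 0 <= k < 400 and k in present and syscallNumberToNameMap[k])
--     return [syscallNumberToNameMap[k] for k in keys]
-- ===== Notes on version B (the rewrite author's own statement) =====
-- stated objective: simpler
-- what changed: Instead of scanning all 400 numbers and testing membership in the list for each, B builds the set of present numbers once, filters the dict's actual keys by range, presence and truthiness, sorts them ascending and maps them to names.
import Mathlib
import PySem

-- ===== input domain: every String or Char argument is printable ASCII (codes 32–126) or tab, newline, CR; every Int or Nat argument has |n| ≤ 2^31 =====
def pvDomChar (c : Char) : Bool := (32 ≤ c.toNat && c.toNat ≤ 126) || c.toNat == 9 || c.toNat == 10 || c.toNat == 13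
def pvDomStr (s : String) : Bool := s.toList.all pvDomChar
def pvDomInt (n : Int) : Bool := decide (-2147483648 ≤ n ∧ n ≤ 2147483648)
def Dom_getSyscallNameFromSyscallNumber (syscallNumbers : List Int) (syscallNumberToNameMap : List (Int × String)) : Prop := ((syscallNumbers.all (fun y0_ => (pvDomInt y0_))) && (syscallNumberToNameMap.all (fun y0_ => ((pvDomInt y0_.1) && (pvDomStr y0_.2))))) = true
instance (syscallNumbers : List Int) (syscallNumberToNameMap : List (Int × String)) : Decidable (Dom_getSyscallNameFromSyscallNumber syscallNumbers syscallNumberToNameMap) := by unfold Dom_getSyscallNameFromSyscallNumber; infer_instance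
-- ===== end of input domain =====

-- B replaces A's fixed 0..399 membership scan by a key-driven pass: filter the dict's
-- own keys (by range, presence in the set of given numbers, and truthy value), sort,
-- and map to names — simpler and independent of the hard-coded range length.

-- ===== PORT A =====
-- while i < 400: if i in syscallNumbers and map.get(i, None): append map[i]
def getSyscallNameFromSyscallNumber (syscallNumbers : List Int) (syscallNumberToNameMap : List (Int × String)) : List String :=
  let d : PySem.Dict Int String := PySem.Dict.mk syscallNumberToNameMap
  (PySem.List.pyRange 0 400 1).foldl
    (fun syscallNameList i =>
      if syscallNumbers.contains i && (d.getD i "" != "") then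
        syscallNameList ++ [d.getD i ""]
      else syscallNameList) []

-- ===== PORT B =====
def getSyscallNameFromSyscallNumber_alt (syscallNumbers : List Int) (syscallNumberToNameMap : List (Int × String)) : List String :=
  let d : PySem.Dict Int String := PySem.Dict.mk syscallNumberToNameMap
  let present : PySem.Set Int := PySem.Set.ofList syscallNumbers
  let keys := PySem.List.sorted
    ((PySem.Set.ofList (syscallNumberToNameMap.map Prod.fst)).filter
      (fun k => decide (0 ≤ k) && decide (k < 400) && present.contains k && (d.getD k "" != "")))
    (fun x => x) false
  keys.map (fun k => d.getD k "")

-- ===== PRECONDITION & SPEC =====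
def Spec_getSyscallNameFromSyscallNumber (syscallNumbers : List Int) (syscallNumberToNameMap : List (Int × String)) (out : List String) : Prop := out = getSyscallNameFromSyscallNumber_alt syscallNumbers syscallNumberToNameMap
instance (syscallNumbers : List Int) (syscallNumberToNameMap : List (Int × String)) (out : List String) : Decidable (Spec_getSyscallNameFromSyscallNumber syscallNumbers syscallNumberToNameMap out) := by unfold Spec_getSyscallNameFromSyscallNumber; infer_instance

-- ===== CLAIM (what is proved, stated in full; the proofs are below) =====
def Claim_equal_getSyscallNameFromSyscallNumber : Prop := ∀ (syscallNumbers : List Int) (syscallNumberToNameMap : List (Int × String)), Dom_getSyscallNameFromSyscallNumber syscallNumbers syscallNumberToNameMap → Spec_getSyscallNameFromSyscallNumber syscallNumbers syscallNumberToNameMap (getSyscallNameFromSyscallNumber syscallNumbers syscallNumberToNameMap)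

-- ===== LEMMAS AND PROOFS =====

-- the common per-key condition
def pvCond (syscallNumbers : List Int) (d : PySem.Dict Int String) (k : Int) : Bool :=
  syscallNumbers.contains k && (d.getD k "" != "")

-- A's key list: the numbers 0..399 that pass the condition
lemma pvA_eq (syscallNumbers : List Int) (m : List (Int × String)) :
    getSyscallNameFromSyscallNumber syscallNumbers m =
      ((PySem.List.pyRange 0 400 1).filter (pvCond syscallNumbers (PySem.Dict.mk m))).map
        (fun k => (PySem.Dict.mk m).getD k "") := by
  unfold getSyscallNameFromSyscallNumber
  rw [PySem.List.foldl_append_if]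
  rfl

-- key lists coincide: both are the strictly increasing enumeration of the same set
lemma pvKeys_eq (syscallNumbers : List Int) (m : List (Int × String)) :
    PySem.List.sorted
      ((PySem.Set.ofList (m.map Prod.fst)).filter
        (fun k => decide (0 ≤ k) && decide (k < 400) &&
          (PySem.Set.ofList syscallNumbers).contains k &&
          ((PySem.Dict.mk m).getD k "" != ""))) (fun x => x) false =
    (PySem.List.pyRange 0 400 1).filter (pvCond syscallNumbers (PySem.Dict.mk m)) := by
  apply PySem.List.sorted_eq_of_perm_of_pairwise_lt
  · -- permutation: both nodup with the same membership
    rw [List.perm_ext_iff_of_nodup ((PySem.List.nodup_pyRange_one 0 400).filter _)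
      ((PySem.Set.nodup_ofList _).filter _)]
    intro k
    simp only [List.mem_filter, PySem.List.mem_pyRange_one, PySem.Set.mem_ofList,
      pvCond, Bool.and_eq_true, decide_eq_true_eq,
      PySem.Set.contains_iff, List.contains_iff_mem]
    constructor
    · rintro ⟨⟨hlo, hhi⟩, hmem, hval⟩
      refine ⟨?_, ⟨⟨hlo, hhi⟩, hmem⟩, hval⟩
      -- a truthy value means the key is a key of the dict
      by_contra hk
      have : (PySem.Dict.mk m).get? k = none := by
        rw [PySem.Dict.get?_eq_none_iff_not_mem_keys]
        simpa using hk
      simp [PySem.Dict.getD_eq_get?_getD, this] at hval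
    · rintro ⟨_, ⟨⟨hlo, hhi⟩, hmem⟩, hval⟩
      exact ⟨⟨hlo, hhi⟩, hmem, hval⟩
  · exact (PySem.List.pairwise_lt_pyRange_one 0 400).filter _

-- ===== VERDICT (by name: the statement is the Claim_ definition above) =====
theorem getSyscallNameFromSyscallNumber_spec : Claim_equal_getSyscallNameFromSyscallNumber := by
  intro syscallNumbers m _
  unfold Spec_getSyscallNameFromSyscallNumber
  rw [pvA_eq]
  simp only [getSyscallNameFromSyscallNumber_alt]
  rw [pvKeys_eq]
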